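-- pv_equiv track=rewrite | github.com/espressif/esp-at | tools/ci/check_docs_format.py | find_backtick_pairs
-- ===== SOURCE A (Python) =====
-- def find_backtick_pairs(line):
--     """Find all backtick pairs and return a list of (start_pos, end_pos) tuples."""
--     backtick_pairs = []
--     backtick_positions = []
--     i = 0
--     while i < len(line):
--         if line[i] == '`':
--             start = i
--             count = 1
--             i += 1
--             while i < len(line) and line[i] == '`':
--                 count += 1
--                 i += 1
--             backtick_positions.append((start, count))
--         else:
--             i += 1
--
--     # Pair backticks: match each opening run with the next closing run of equal or greater length
--     i = 0
--     while i < len(backtick_positions):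
--         start_pos, start_count = backtick_positions[i]
--         j = i + 1
--         while j < len(backtick_positions):
--             end_pos, end_count = backtick_positions[j]
--             if end_count >= start_count:
--                 backtick_pairs.append((start_pos, end_pos + end_count))
--                 i = j
--                 break
--             j += 1
--         i += 1
--
--     return backtick_pairs
-- ===== SOURCE B (Python) =====
-- def find_backtick_pairs(line):
--     """Find all backtick pairs and return a list of (start_pos, end_pos) tuples."""
--     # 1. Collect backtick runs in one pass with an "open run" state.
--     runs = []
--     open_pos = None
--     for idx, ch in enumerate(line):
--         if ch == '`':
--             if open_pos is None:
--                 open_pos = idx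
--         elif open_pos is not None:
--             runs.append((open_pos, idx - open_pos))
--             open_pos = None
--     if open_pos is not None:
--         runs.append((open_pos, len(line) - open_pos))
--
--     # 2. For each run, the index of the next run of equal-or-greater length,
--     #    via a right-to-left monotonic stack (O(R) total).
--     r = len(runs)
--     nxt = []  # built back-to-front
--     stack = []  # indices; run lengths non-decreasing from top to bottom
--     for i in range(r - 1, -1, -1):
--         c = runs[i][1]
--         while stack and runs[stack[-1]][1] < c:
--             stack.pop()
--         nxt.append(stack[-1] if stack else None)
--         stack.append(i)
--     nxt.reverse()
--
--     # 3. Jump through the runs: pair run i with run nxt[i], continue after it.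
--     pairs = []
--     i = 0
--     while i < r:
--         j = nxt[i]
--         if j is None:
--             i += 1
--         else:
--             p, c = runs[j]
--             pairs.append((runs[i][0], p + c))
--             i = j + 1
--     return pairs
-- ===== Notes on version B (the rewrite author's own statement) =====
-- stated objective: faster
-- what changed: Replaces the index-jumping character scan and the quadratic nested search for the next equal-or-longer backtick run with a single enumerate pass that collects runs and a right-to-left monotonic stack that precomputes each run's next equal-or-greater partner, so pairing is a linear jump with no inner scan.
import Mathlib
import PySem

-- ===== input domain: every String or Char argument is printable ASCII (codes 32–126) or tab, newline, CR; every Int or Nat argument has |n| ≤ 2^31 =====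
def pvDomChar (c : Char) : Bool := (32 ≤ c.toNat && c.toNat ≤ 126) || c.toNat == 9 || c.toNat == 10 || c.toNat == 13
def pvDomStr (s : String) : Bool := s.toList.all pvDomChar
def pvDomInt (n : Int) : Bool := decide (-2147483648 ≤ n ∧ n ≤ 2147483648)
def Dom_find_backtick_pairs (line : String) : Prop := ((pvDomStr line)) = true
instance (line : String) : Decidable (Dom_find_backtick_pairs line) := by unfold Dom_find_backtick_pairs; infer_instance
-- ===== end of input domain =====

-- B replaces A's quadratic "scan forward for the next equal-or-longer run" pairing with a
-- right-to-left monotonic-stack precomputation of each run's partner (objective: faster).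
-- All `fuel` parameters below are totality guards only: each loop's index strictly increases.

-- ===== PORT A =====
-- inner character loop: while i < len(line) and line[i] == '`': count += 1; i += 1
def aInner (cs : List Char) : Nat → Nat → Nat → Nat × Nat
  | 0, i, count => (i, count)
  | fuel+1, i, count =>
    if h : i < cs.length then
      if cs[i] = '`' then aInner cs fuel (i+1) (count+1) else (i, count)
    else (i, count)

-- outer character loop collecting backtick_positions
def aOuter (cs : List Char) : Nat → Nat → List (Int × Int)
  | 0, _ => []
  | fuel+1, i =>
    if h : i < cs.length then
      if cs[i] = '`' then
        ((i : Int), ((aInner cs (cs.length + 1) (i+1) 1).2 : Int)) ::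
          aOuter cs fuel (aInner cs (cs.length + 1) (i+1) 1).1
      else aOuter cs fuel (i+1)
    else []

-- inner pairing loop: scan j = i+1, i+2, … for the first run with end_count >= start_count
def aFindClose (ps : List (Int × Int)) : Nat → Int → Nat → Option Nat
  | 0, _, _ => none
  | fuel+1, startCount, j =>
    if h : j < ps.length then
      if (ps[j]).2 ≥ startCount then some j else aFindClose ps fuel startCount (j+1)
    else none

-- outer pairing loop: on a match append the pair and restart at j+1, else advance by one
def aPair (ps : List (Int × Int)) : Nat → Nat → List (Int × Int)
  | 0, _ => []
  | fuel+1, i =>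
    if h : i < ps.length then
      match aFindClose ps (ps.length + 1) (ps[i]).2 (i+1) with
      | some j => ((ps[i]).1, (ps.getD j (0,0)).1 + (ps.getD j (0,0)).2) :: aPair ps fuel (j+1)
      | none => aPair ps fuel (i+1)
    else []

def find_backtick_pairs (line : String) : List (Int × Int) :=
  let ps := aOuter line.toList (line.toList.length + 1) 0
  aPair ps (ps.length + 1) 0

-- ===== PORT B =====
-- one enumerate pass with an "open run" state
def bStep (st : List (Int × Int) × Option Int) (ic : Int × Char) : List (Int × Int) × Option Int :=
  if ic.2 = '`' then
    match st.2 with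
    | none => (st.1, some ic.1)
    | some _ => st
  else
    match st.2 with
    | none => st
    | some p => (st.1 ++ [(p, ic.1 - p)], none)

def bRuns (line : String) : List (Int × Int) :=
  let cs := line.toList
  let st := (PySem.List.enumerate cs 0).foldl bStep ([], none)
  match st.2 with
  | none => st.1
  | some p => st.1 ++ [(p, (cs.length : Int) - p)]

-- right-to-left monotonic stack: nxt[i] = index of next run with length >= runs[i]'s length
def bNxtGo (runs : List (Int × Int)) : Nat → List Nat → List (Option Nat) → List (Option Nat)
  | 0, _, acc => acc
  | i+1, stack, acc =>
    bNxtGo runs i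
      (i :: stack.dropWhile (fun j => decide ((runs.getD j (0,0)).2 < (runs.getD i (0,0)).2)))
      ((stack.dropWhile (fun j => decide ((runs.getD j (0,0)).2 < (runs.getD i (0,0)).2))).head? :: acc)

def bNxt (runs : List (Int × Int)) : List (Option Nat) := bNxtGo runs runs.length [] []

-- jump loop over the runs
def bJump (runs : List (Int × Int)) (nxt : List (Option Nat)) : Nat → Nat → List (Int × Int)
  | 0, _ => []
  | fuel+1, i =>
    if h : i < runs.length then
      match nxt.getD i none with
      | none => bJump runs nxt fuel (i+1)
      | some j => ((runs[i]).1, (runs.getD j (0,0)).1 + (runs.getD j (0,0)).2) :: bJump runs nxt fuel (j+1)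
    else []

def find_backtick_pairs_alt (line : String) : List (Int × Int) :=
  let runs := bRuns line
  bJump runs (bNxt runs) (runs.length + 1) 0

-- ===== PRECONDITION & SPEC =====
def Spec_find_backtick_pairs (line : String) (out : List (Int × Int)) : Prop := out = find_backtick_pairs_alt line
instance (line : String) (out : List (Int × Int)) : Decidable (Spec_find_backtick_pairs line out) := by unfold Spec_find_backtick_pairs; infer_instance

-- ===== CLAIM (what is proved, stated in full; the proofs are below) =====
def Claim_equal_find_backtick_pairs : Prop := ∀ (line : String), Dom_find_backtick_pairs line → Spec_find_backtick_pairs line (find_backtick_pairs line)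

-- ===== LEMMAS AND PROOFS =====

-- structural versions of A's character loops (recursion on the remaining suffix)
def inner' : List Char → Nat → Nat → List Char × Nat × Nat
  | [], i, c => ([], i, c)
  | x :: xs, i, c => if x = '`' then inner' xs (i+1) (c+1) else (x :: xs, i, c)

lemma inner'_len : ∀ (l : List Char) (i c : Nat), (inner' l i c).1.length ≤ l.length := by
  intro l
  induction l with
  | nil => intro i c; simp [inner']
  | cons x xs ih =>
      intro i c
      by_cases hx : x = '`'
      · simp only [inner', hx, if_true]
        have := ih (i+1) (c+1); simp; omega
      · simp [inner', hx]

def outer' : List Char → Nat → List (Int × Int)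
  | [], _ => []
  | x :: xs, i =>
    if x = '`' then
      ((i : Int), ((inner' xs (i+1) 1).2.2 : Int)) ::
        outer' (inner' xs (i+1) 1).1 (inner' xs (i+1) 1).2.1
    else outer' xs (i+1)
termination_by l _ => l.length
decreasing_by
  · have := inner'_len xs (i+1) 1; simp; omega
  · simp

lemma aInner_ge (cs : List Char) :
    ∀ (fuel i c : Nat), i ≤ (aInner cs fuel i c).1 := by
  intro fuel
  induction fuel with
  | zero => intro i c; simp [aInner]
  | succ fuel ih =>
      intro i c
      rw [aInner]
      by_cases h : i < cs.length
      · by_cases hb : cs[i] = '`'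
        · simp only [h, hb, dif_pos, if_true]
          have := ih (i+1) (c+1); omega
        · simp [h, hb]
      · simp [h]

lemma aInner_upper (cs : List Char) :
    ∀ (fuel i c : Nat), i ≤ cs.length → (aInner cs fuel i c).1 ≤ cs.length := by
  intro fuel
  induction fuel with
  | zero => intro i c hi; simpa [aInner] using hi
  | succ fuel ih =>
      intro i c hi
      rw [aInner]
      by_cases h : i < cs.length
      · by_cases hb : cs[i] = '`'
        · simp only [h, hb, dif_pos, if_true]
          exact ih (i+1) (c+1) (by omega)
        · simp [h, hb]; omega
      · simp [h]; omega

lemma inner_bridge (cs : List Char) :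
    ∀ (fuel i c : Nat), cs.length - i < fuel →
      inner' (cs.drop i) i c = (cs.drop (aInner cs fuel i c).1, aInner cs fuel i c) := by
  intro fuel
  induction fuel with
  | zero => intro i c h; omega
  | succ fuel ih =>
      intro i c hf
      rw [aInner]
      by_cases h : i < cs.length
      · rw [List.drop_eq_getElem_cons h]
        by_cases hb : cs[i] = '`'
        · simp only [inner', h, hb, dif_pos, if_true]
          exact ih (i+1) (c+1) (by omega)
        · simp [inner', h, hb, ← List.drop_eq_getElem_cons h]
      · have hd : cs.drop i = [] := List.drop_eq_nil_of_le (by omega)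
        simp [inner', h, hd]

lemma outer_bridge (cs : List Char) :
    ∀ (fuel i : Nat), i ≤ cs.length → cs.length - i < fuel →
      aOuter cs fuel i = outer' (cs.drop i) i := by
  intro fuel
  induction fuel with
  | zero => intro i hi h; omega
  | succ fuel ih =>
      intro i hi hf
      rw [aOuter]
      by_cases h : i < cs.length
      · rw [List.drop_eq_getElem_cons h]
        by_cases hb : cs[i] = '`'
        · simp only [h, hb, dif_pos, if_true, outer']
          rw [inner_bridge cs (cs.length + 1) (i+1) 1 (by omega)]
          have hge : i + 1 ≤ (aInner cs (cs.length + 1) (i+1) 1).1 := aInner_ge cs _ (i+1) 1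
          have hup : (aInner cs (cs.length + 1) (i+1) 1).1 ≤ cs.length :=
            aInner_upper cs _ (i+1) 1 (by omega)
          exact congrArg _ (ih _ hup (by omega))
        · simp only [h, hb, dif_pos, if_false, outer']
          exact ih (i+1) (by omega) (by omega)
      · have hd : cs.drop i = [] := List.drop_eq_nil_of_le (by omega)
        simp [h, hd, outer']

-- the flush at the end of B's run-collection pass
def finishRuns (st : List (Int × Int) × Option Int) (L : Nat) : List (Int × Int) :=
  match st.2 with
  | none => st.1
  | some p => st.1 ++ [(p, (L : Int) - p)]

def castPo : Option Nat → Option Int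
  | none => none
  | some p => some (p : Int)

lemma fold_bridge (l : List Char) : ∀ (k : Nat) (acc : List (Int × Int)) (po : Option Nat),
    (∀ p, po = some p → p ≤ k) →
    finishRuns ((PySem.List.enumerate l (k : Int)).foldl bStep (acc, castPo po)) (k + l.length)
      = acc ++ (match po with
                | none => outer' l k
                | some p => ((p : Int), ((inner' l k (k - p)).2.2 : Int)) ::
                    outer' (inner' l k (k - p)).1 (inner' l k (k - p)).2.1) := by
  induction l with
  | nil =>
      intro k acc po hp
      cases po with
      | none => simp [PySem.List.enumerate_nil, castPo, finishRuns, outer']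
      | some p =>
          have hpk := hp p rfl
          simp [PySem.List.enumerate_nil, castPo, finishRuns, outer', inner', Prod.ext_iff]
          omega
  | cons x xs ih =>
      intro k acc po hp
      rw [PySem.List.enumerate_cons, List.foldl_cons,
          show (k : Int) + 1 = ((k+1 : Nat) : Int) by push_cast; ring]
      have hlen : (k+1) + xs.length = k + (x :: xs).length := by simp; omega
      by_cases hx : x = '`'
      · cases po with
        | none =>
            have hstep : bStep (acc, castPo none) ((k:Int), x) = (acc, castPo (some k)) := by
              simp [bStep, castPo, hx]
            rw [hstep]
            have h2 := ih (k+1) acc (some k) (by intro p hp'; cases hp'; omega)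
            rw [hlen] at h2
            rw [h2]
            simp only [outer', hx, if_true, Nat.add_sub_cancel_left]
        | some p =>
            have hpk := hp p rfl
            have hstep : bStep (acc, castPo (some p)) ((k:Int), x) = (acc, castPo (some p)) := by
              simp [bStep, castPo, hx]
            rw [hstep]
            have h2 := ih (k+1) acc (some p) (by intro q hq; cases hq; omega)
            rw [hlen] at h2
            rw [h2]
            have harg : k + 1 - p = (k - p) + 1 := by omega
            simp only [inner', hx, if_true, harg]
      · cases po with
        | none =>
            have hstep : bStep (acc, castPo none) ((k:Int), x) = (acc, castPo none) := by
              simp [bStep, castPo, hx]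
            rw [hstep]
            have h2 := ih (k+1) acc none (by intro p hp'; cases hp')
            rw [hlen] at h2
            rw [h2]
            simp [outer', hx]
        | some p =>
            have hpk := hp p rfl
            have hstep : bStep (acc, castPo (some p)) ((k:Int), x)
                = (acc ++ [((p:Int), (k:Int) - (p:Int))], castPo none) := by
              simp [bStep, castPo, hx]
            rw [hstep]
            have h2 := ih (k+1) (acc ++ [((p:Int), (k:Int) - (p:Int))]) none (by intro q hq; cases hq)
            rw [hlen] at h2
            rw [h2]
            have hc : (k : Int) - (p : Int) = ((k - p : Nat) : Int) := by omega
            simp only [inner', hx, if_false, outer', hc, List.append_assoc,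
                       List.singleton_append]

lemma runs_eq (line : String) : bRuns line = aOuter line.toList (line.toList.length + 1) 0 := by
  have h := fold_bridge line.toList 0 [] none (by intro p hp; cases hp)
  simp only [castPo, Nat.cast_zero, Nat.zero_add, List.nil_append] at h
  rw [outer_bridge line.toList (line.toList.length + 1) 0 (by omega) (by omega)]
  simpa [bRuns, finishRuns] using h

-- ----- pairing stage: the monotonic stack computes exactly A's inner-scan result -----

lemma afc_congr (ps : List (Int × Int)) :
    ∀ (f1 f2 : Nat) (c : Int) (j : Nat), ps.length - j < f1 → ps.length - j < f2 →
      aFindClose ps f1 c j = aFindClose ps f2 c j := by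
  intro f1
  induction f1 with
  | zero => intro f2 c j h1 h2; omega
  | succ f1 ih =>
      intro f2 c j h1 h2
      cases f2 with
      | zero => omega
      | succ f2 =>
          rw [aFindClose, aFindClose]
          by_cases h : j < ps.length
          · by_cases hb : (ps[j]).2 ≥ c
            · simp [h, hb]
            · simp only [h, hb, dif_pos, if_false]
              exact ih f2 c (j+1) (by omega) (by omega)
          · simp [h]

lemma afc_unfold (runs : List (Int × Int)) (c : Int) (i : Nat) (h : i < runs.length) :
    aFindClose runs (runs.length + 1) c i
      = if (runs[i]).2 ≥ c then some i else aFindClose runs (runs.length + 1) c (i+1) := by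
  rw [aFindClose]
  by_cases hb : (runs[i]).2 ≥ c
  · simp [h, hb]
  · simp only [h, hb, dif_pos, if_false]
    exact afc_congr runs _ _ c (i+1) (by omega) (by omega)

def nxtSpec (runs : List (Int × Int)) (i : Nat) : Option Nat :=
  aFindClose runs (runs.length + 1) (runs.getD i (0,0)).2 (i+1)

def InvStack (runs : List (Int × Int)) (stack : List Nat) (i : Nat) : Prop :=
  ∀ c : Int, stack.find? (fun j => decide (c ≤ (runs.getD j (0,0)).2))
      = aFindClose runs (runs.length + 1) c i

lemma find?_eq_head?_dropWhile {α : Type} (p : α → Bool) :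
    ∀ l : List α, l.find? p = (l.dropWhile (fun a => !p a)).head? := by
  intro l
  induction l with
  | nil => simp
  | cons x xs ih =>
      by_cases hx : p x = true
      · simp [List.find?_cons_of_pos hx, hx]
      · have hx' : p x = false := by simpa using hx
        rw [List.find?_cons_of_neg (by simp [hx']), List.dropWhile_cons]
        simp [hx', ih]

lemma pred_flip (runs : List (Int × Int)) (ci : Int) :
    (fun j => !(decide (ci ≤ (runs.getD j (0,0)).2)))
      = (fun j : Nat => decide ((runs.getD j (0,0)).2 < ci)) := by
  funext j
  rw [← decide_not]
  exact decide_eq_decide.mpr (by omega)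

lemma inv_step (runs : List (Int × Int)) (stack : List Nat) (i : Nat) (hiR : i < runs.length)
    (hInv : InvStack runs stack (i+1)) :
    InvStack runs (i :: stack.dropWhile
      (fun j => decide ((runs.getD j (0,0)).2 < (runs.getD i (0,0)).2))) i := by
  intro c
  have hgd : (runs.getD i (0,0)) = runs[i] := List.getD_eq_getElem runs (0,0) hiR
  rw [afc_unfold runs c i hiR]
  by_cases hc : c ≤ (runs.getD i (0,0)).2
  · rw [List.find?_cons_of_pos (by simpa using hc)]
    rw [if_pos (by rw [← hgd]; omega)]
  · rw [List.find?_cons_of_neg (by simpa using hc)]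
    rw [if_neg (by rw [← hgd]; omega)]
    rw [← hInv c]
    conv_rhs => rw [← List.takeWhile_append_dropWhile
      (p := fun j => decide ((runs.getD j (0,0)).2 < (runs.getD i (0,0)).2)) (l := stack)]
    rw [List.find?_append]
    have hnone : (stack.takeWhile
        (fun j => decide ((runs.getD j (0,0)).2 < (runs.getD i (0,0)).2))).find?
        (fun j => decide (c ≤ (runs.getD j (0,0)).2)) = none := by
      apply List.find?_eq_none.mpr
      intro x hx
      have h1 := List.mem_takeWhile_imp hx
      simp only [decide_eq_true_eq] at h1
      simp only [decide_eq_true_eq]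
      omega
    rw [hnone, Option.none_or]

lemma go_spec (runs : List (Int × Int)) : ∀ (i : Nat) (stack : List Nat) (acc : List (Option Nat)),
    i ≤ runs.length → InvStack runs stack i →
    bNxtGo runs i stack acc = (List.range i).map (nxtSpec runs) ++ acc := by
  intro i
  induction i with
  | zero => intro stack acc _ _; simp [bNxtGo]
  | succ i ih =>
      intro stack acc hle hInv
      rw [bNxtGo]
      have hiR : i < runs.length := by omega
      rw [ih _ _ (by omega) (inv_step runs stack i hiR hInv)]
      have hhead : (stack.dropWhile
          (fun j => decide ((runs.getD j (0,0)).2 < (runs.getD i (0,0)).2))).head?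
          = nxtSpec runs i := by
        rw [← pred_flip runs (runs.getD i (0,0)).2,
            ← find?_eq_head?_dropWhile (fun j => decide ((runs.getD i (0,0)).2 ≤ (runs.getD j (0,0)).2)) stack]
        exact hInv _
      rw [hhead, List.range_succ, List.map_append]
      simp

lemma bNxt_getD (runs : List (Int × Int)) (i : Nat) (hi : i < runs.length) :
    (bNxt runs).getD i none = nxtSpec runs i := by
  have hbase : InvStack runs [] runs.length := by
    intro c
    rw [aFindClose]
    simp
  rw [bNxt, go_spec runs runs.length [] [] (le_refl _) hbase]
  simp [List.getD_eq_getElem?_getD, List.getElem?_range hi]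

lemma jump_eq (runs : List (Int × Int)) :
    ∀ (fuel i : Nat), bJump runs (bNxt runs) fuel i = aPair runs fuel i := by
  intro fuel
  induction fuel with
  | zero => intro i; rfl
  | succ fuel ih =>
      intro i
      rw [bJump, aPair]
      by_cases hiR : i < runs.length
      · simp only [hiR, dif_pos]
        rw [bNxt_getD runs i hiR, nxtSpec, List.getD_eq_getElem runs (0,0) hiR]
        cases hf : aFindClose runs (runs.length + 1) (runs[i]).2 (i+1) with
        | none => simpa using ih (i+1)
        | some j => simpa using ih (j+1)
      · simp [hiR]

-- ===== VERDICT (by name: the statement is the Claim_ definition above) =====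
theorem find_backtick_pairs_spec : Claim_equal_find_backtick_pairs := by
  intro line _
  unfold Spec_find_backtick_pairs find_backtick_pairs find_backtick_pairs_alt
  rw [runs_eq line]
  exact (jump_eq (aOuter line.toList (line.toList.length + 1) 0) _ 0).symm
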